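-- pv_equiv track=rewrite | github.com/julianaviola98/puzzles | my_solutions/puzzle07/tiling.py | tileYardWith4MissingTiles
-- ===== SOURCE A (Python) =====
-- import itertools
--
-- def tileYardWith4MissingTiles(n, missingTileLocations):
--     # Case 1: The four missing tiles are in four different quadrants.
--     # Number the quadrants like so:
--     # 0 = top left
--     # 1 = top right
--     # 2 = bottom left
--     # 3 = bottom right
--     size = 2**n
--     halfSize = size // 2
--     quadrantCount = [0] * 4
--     for missingTileLocation in missingTileLocations:
--         row = missingTileLocation[0]
--         column = missingTileLocation[1]
--         if row < halfSize:
--             if column < halfSize: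
--                 quadrantCount[0] += 1
--             else:
--                 quadrantCount[1] += 1
--         else:
--             if column < halfSize:
--                 quadrantCount[2] += 1
--             else:
--                 quadrantCount[3] += 1
--     if quadrantCount == [1, 1, 1, 1]:
--         return True
--
--     # Case 2: Any three of the four tiles are such that you can tile them using a tromino.
--     for subset in itertools.combinations(missingTileLocations, 3):
--         coordinateDiffs = []
--         for pair in itertools.combinations(subset, 2):
--             coordinateDiff = (pair[0][0] - pair[1][0], pair[0][1] - pair[1][1])
--             coordinateDiffs.append(coordinateDiff)
--         if ((0, 1) in coordinateDiffs or (0, -1) in coordinateDiffs) and ((1, 0) in coordinateDiffs or (-1, 0) in coordinateDiffs):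
--             return True
--
--     return False
-- ===== SOURCE B (Python) =====
-- def tileYardWith4MissingTiles(n, missingTileLocations):
--     half = 2**n // 2 if n > 0 else 0
--     tiles = [tuple(t) for t in missingTileLocations]
--
--     # Case 1: exactly four tiles, one in each quadrant.
--     quadrants = {(r < half, c < half) for (r, c) in tiles}
--     if len(tiles) == 4 and len(quadrants) == 4:
--         return True
--
--     # Case 2: some tile has a horizontal neighbour and a vertical
--     # neighbour among the missing tiles (an L-tromino corner).
--     s = set(tiles)
--     for (r, c) in s:
--         if ((r, c - 1) in s or (r, c + 1) in s) and ((r - 1, c) in s or (r + 1, c) in s):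
--             return True
--     return False
-- ===== Notes on version B (the rewrite author's own statement) =====
-- stated objective: faster
-- what changed: Case 1's quadrant-count list becomes a set of quadrant labels (4 tiles, 4 distinct quadrants), and Case 2's scan over all 3-element combinations with pairwise coordinate differences becomes a single pass over a hash set of the tiles that looks for a tile with a horizontal and a vertical neighbour (the L-tromino corner).
import Mathlib
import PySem

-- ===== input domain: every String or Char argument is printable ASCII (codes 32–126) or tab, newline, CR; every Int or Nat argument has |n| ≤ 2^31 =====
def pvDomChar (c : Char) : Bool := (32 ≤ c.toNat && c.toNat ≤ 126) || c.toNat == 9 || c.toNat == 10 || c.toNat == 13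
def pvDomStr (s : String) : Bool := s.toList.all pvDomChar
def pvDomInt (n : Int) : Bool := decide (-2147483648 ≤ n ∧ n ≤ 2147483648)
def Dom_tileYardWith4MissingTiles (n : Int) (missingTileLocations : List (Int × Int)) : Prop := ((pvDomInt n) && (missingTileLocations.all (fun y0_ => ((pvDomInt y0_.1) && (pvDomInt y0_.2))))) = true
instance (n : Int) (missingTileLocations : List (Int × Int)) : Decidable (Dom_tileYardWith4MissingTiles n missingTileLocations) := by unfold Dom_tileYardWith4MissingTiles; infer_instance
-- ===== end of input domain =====

-- B replaces A's O(m^3) scan of 3-element combinations by a direct corner scan over a set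
-- of the tiles, and A's quadrant-count list by a set of quadrant labels (objective: faster).

-- ===== PORT A =====
-- itertools.combinations(l, 2), in itertools' order
def pvCombos2 {α : Type} (l : List α) : List (α × α) :=
  match l with
  | [] => []
  | x :: xs => xs.map (fun y => (x, y)) ++ pvCombos2 xs

-- itertools.combinations(l, 3), in itertools' order
def pvCombos3 {α : Type} (l : List α) : List (α × α × α) :=
  match l with
  | [] => []
  | x :: xs => (pvCombos2 xs).map (fun p => (x, p.1, p.2)) ++ pvCombos3 xs

def tileYardWith4MissingTiles (n : Int) (missingTileLocations : List (Int × Int)) : Bool :=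
  -- Python: size = 2**n; halfSize = size // 2.  For n < 0 Python's 2**n is a float in [0, 1)
  -- and (that float) // 2 is 0.0, which compares to the integer rows/columns exactly as the
  -- integer 0 does; ported exactly as 0 in that branch.
  let halfSize : Int := if n < 0 then 0 else 2 ^ n.toNat / 2
  let quadrantCount : Int × Int × Int × Int :=
    missingTileLocations.foldl (fun q t =>
      let row := t.1
      let column := t.2
      if row < halfSize then
        if column < halfSize then (q.1 + 1, q.2.1, q.2.2.1, q.2.2.2)
        else (q.1, q.2.1 + 1, q.2.2.1, q.2.2.2)
      else
        if column < halfSize then (q.1, q.2.1, q.2.2.1 + 1, q.2.2.2)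
        else (q.1, q.2.1, q.2.2.1, q.2.2.2 + 1)) (0, 0, 0, 0)
  if quadrantCount = (1, 1, 1, 1) then true
  else
    (pvCombos3 missingTileLocations).any (fun s =>
      let coordinateDiffs : List (Int × Int) :=
        (pvCombos2 [s.1, s.2.1, s.2.2]).map (fun p => (p.1.1 - p.2.1, p.1.2 - p.2.2))
      (coordinateDiffs.contains ((0 : Int), (1 : Int)) || coordinateDiffs.contains ((0 : Int), (-1 : Int))) &&
      (coordinateDiffs.contains ((1 : Int), (0 : Int)) || coordinateDiffs.contains ((-1 : Int), (0 : Int))))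

-- ===== PORT B =====
def tileYardWith4MissingTiles_alt (n : Int) (missingTileLocations : List (Int × Int)) : Bool :=
  let half : Int := if n > 0 then 2 ^ n.toNat / 2 else 0
  let tiles := missingTileLocations  -- tuple(t) is the identity under the type convention
  -- Case 1: exactly four tiles, one in each quadrant.
  let quadrants : PySem.Set (Bool × Bool) :=
    PySem.Set.ofList (tiles.map (fun t => (decide (t.1 < half), decide (t.2 < half))))
  if tiles.length = 4 ∧ quadrants.length = 4 then true
  else
    -- Case 2: some tile has a horizontal and a vertical neighbour among the missing tiles.
    let s : PySem.Set (Int × Int) := PySem.Set.ofList tiles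
    s.any (fun t =>
      (PySem.Set.contains s (t.1, t.2 - 1) || PySem.Set.contains s (t.1, t.2 + 1)) &&
      (PySem.Set.contains s (t.1 - 1, t.2) || PySem.Set.contains s (t.1 + 1, t.2)))

-- ===== PRECONDITION & SPEC =====
def Spec_tileYardWith4MissingTiles (n : Int) (missingTileLocations : List (Int × Int)) (out : Bool) : Prop := out = tileYardWith4MissingTiles_alt n missingTileLocations
instance (n : Int) (missingTileLocations : List (Int × Int)) (out : Bool) : Decidable (Spec_tileYardWith4MissingTiles n missingTileLocations out) := by unfold Spec_tileYardWith4MissingTiles; infer_instance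

-- ===== CLAIM (what is proved, stated in full; the proofs are below) =====
def Claim_equal_tileYardWith4MissingTiles : Prop := ∀ (n : Int) (missingTileLocations : List (Int × Int)), Dom_tileYardWith4MissingTiles n missingTileLocations → Spec_tileYardWith4MissingTiles n missingTileLocations (tileYardWith4MissingTiles n missingTileLocations)

-- ===== LEMMAS AND PROOFS =====

-- the corner property both Case-2 computations decide
def pvCorner (l : List (Int × Int)) : Prop :=
  ∃ p ∈ l, ∃ h ∈ l, ∃ v ∈ l,
    h.1 = p.1 ∧ (h.2 = p.2 - 1 ∨ h.2 = p.2 + 1) ∧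
    (v.1 = p.1 - 1 ∨ v.1 = p.1 + 1) ∧ v.2 = p.2

theorem pvCombos2_mem {α : Type} {l : List α} {p : α × α} (h : p ∈ pvCombos2 l) :
    p.1 ∈ l ∧ p.2 ∈ l := by
  induction l with
  | nil => simp [pvCombos2] at h
  | cons x xs ih =>
    simp only [pvCombos2, List.mem_append, List.mem_map] at h
    rcases h with ⟨y, hy, rfl⟩ | h
    · exact ⟨List.mem_cons_self, List.mem_cons_of_mem _ hy⟩
    · exact ⟨List.mem_cons_of_mem _ (ih h).1, List.mem_cons_of_mem _ (ih h).2⟩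

theorem pvCombos3_mem {α : Type} {l : List α} {t : α × α × α} (h : t ∈ pvCombos3 l) :
    t.1 ∈ l ∧ t.2.1 ∈ l ∧ t.2.2 ∈ l := by
  induction l with
  | nil => simp [pvCombos3] at h
  | cons x xs ih =>
    simp only [pvCombos3, List.mem_append, List.mem_map] at h
    rcases h with ⟨p, hp, rfl⟩ | h
    · exact ⟨List.mem_cons_self, List.mem_cons_of_mem _ (pvCombos2_mem hp).1,
        List.mem_cons_of_mem _ (pvCombos2_mem hp).2⟩
    · exact ⟨List.mem_cons_of_mem _ (ih h).1, List.mem_cons_of_mem _ (ih h).2.1,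
        List.mem_cons_of_mem _ (ih h).2.2⟩

theorem pvCombos2_complete {α : Type} {l : List α} {x y : α}
    (hx : x ∈ l) (hy : y ∈ l) (hne : x ≠ y) :
    (x, y) ∈ pvCombos2 l ∨ (y, x) ∈ pvCombos2 l := by
  induction l with
  | nil => simp at hx
  | cons a as ih =>
    rcases List.mem_cons.mp hx with rfl | hx'
    · have hy' : y ∈ as := by
        rcases List.mem_cons.mp hy with rfl | h
        · exact absurd rfl hne
        · exact h
      exact Or.inl (List.mem_append_left _ (List.mem_map.mpr ⟨y, hy', rfl⟩))
    · rcases List.mem_cons.mp hy with rfl | hy'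
      · exact Or.inr (List.mem_append_left _ (List.mem_map.mpr ⟨x, hx', rfl⟩))
      · rcases ih hx' hy' with h | h
        · exact Or.inl (List.mem_append_right _ h)
        · exact Or.inr (List.mem_append_right _ h)

theorem pvCombos3_complete {α : Type} {l : List α} {x y z : α}
    (hx : x ∈ l) (hy : y ∈ l) (hz : z ∈ l)
    (hxy : x ≠ y) (hxz : x ≠ z) (hyz : y ≠ z) :
    ∃ t ∈ pvCombos3 l,
      t = (x, y, z) ∨ t = (x, z, y) ∨ t = (y, x, z) ∨
      t = (y, z, x) ∨ t = (z, x, y) ∨ t = (z, y, x) := by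
  induction l with
  | nil => simp at hx
  | cons a as ih =>
    have push : ∀ (t : α × α × α), t ∈ pvCombos3 as → t ∈ pvCombos3 (a :: as) := by
      intro t ht; exact List.mem_append_right _ ht
    have head : ∀ (u v : α), (u, v) ∈ pvCombos2 as → (a, u, v) ∈ pvCombos3 (a :: as) := by
      intro u v huv; exact List.mem_append_left _ (List.mem_map.mpr ⟨(u, v), huv, rfl⟩)
    rcases List.mem_cons.mp hx with rfl | hx'
    · have hy' : y ∈ as := (List.mem_cons.mp hy).resolve_left (fun h => hxy h.symm)
      have hz' : z ∈ as := (List.mem_cons.mp hz).resolve_left (fun h => hxz h.symm)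
      rcases pvCombos2_complete hy' hz' hyz with h | h
      · exact ⟨(x, y, z), head y z h, by simp⟩
      · exact ⟨(x, z, y), head z y h, by simp⟩
    · rcases List.mem_cons.mp hy with rfl | hy'
      · have hz' : z ∈ as := (List.mem_cons.mp hz).resolve_left (fun h => hyz h.symm)
        rcases pvCombos2_complete hx' hz' hxz with h | h
        · exact ⟨(y, x, z), head x z h, by simp⟩
        · exact ⟨(y, z, x), head z x h, by simp⟩
      · rcases List.mem_cons.mp hz with rfl | hz'
        · rcases pvCombos2_complete hx' hy' hxy with h | h
          · exact ⟨(z, x, y), head x y h, by simp⟩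
          · exact ⟨(z, y, x), head y x h, by simp⟩
        · obtain ⟨t, ht, hperm⟩ := ih hx' hy' hz'
          exact ⟨t, push t ht, hperm⟩

-- A's Case-2 scan decides pvCorner
theorem pvCase2A_iff (l : List (Int × Int)) :
    ((pvCombos3 l).any (fun s =>
      let coordinateDiffs : List (Int × Int) :=
        (pvCombos2 [s.1, s.2.1, s.2.2]).map (fun p => (p.1.1 - p.2.1, p.1.2 - p.2.2))
      (coordinateDiffs.contains ((0 : Int), (1 : Int)) || coordinateDiffs.contains ((0 : Int), (-1 : Int))) &&
      (coordinateDiffs.contains ((1 : Int), (0 : Int)) || coordinateDiffs.contains ((-1 : Int), (0 : Int)))) = true)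
    ↔ pvCorner l := by
  rw [List.any_eq_true]
  constructor
  · rintro ⟨⟨a, b, c⟩, hmem, hcond⟩
    obtain ⟨ha, hb, hc⟩ := pvCombos3_mem hmem
    simp only [pvCombos2, List.map, List.map_cons, List.nil_append,
      List.cons_append, List.contains_cons, List.contains_nil,
      Bool.or_false, Bool.and_eq_true, Bool.or_eq_true, beq_iff_eq, Prod.mk.injEq] at hcond
    obtain ⟨hH, hV⟩ := hcond
    unfold pvCorner
    rcases hH with (hH | hH | hH) | (hH | hH | hH) <;>
      rcases hV with (hV | hV | hV) | (hV | hV | hV) <;>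
    first
    | exact ⟨a, ha, b, hb, c, hc, by omega⟩
    | exact ⟨a, ha, c, hc, b, hb, by omega⟩
    | exact ⟨b, hb, a, ha, c, hc, by omega⟩
    | exact ⟨b, hb, c, hc, a, ha, by omega⟩
    | exact ⟨c, hc, a, ha, b, hb, by omega⟩
    | exact ⟨c, hc, b, hb, a, ha, by omega⟩
  · rintro ⟨p, hp, h, hh, v, hv, h1, h2, v1, v2⟩
    have hph : p ≠ h := by intro e; rw [e] at h2; omega
    have hpv : p ≠ v := by intro e; rw [e] at v1; omega
    have hhv : h ≠ v := by intro e; rw [e] at h1; omega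
    obtain ⟨t, ht, hperm⟩ := pvCombos3_complete hp hh hv hph hpv hhv
    refine ⟨t, ht, ?_⟩
    rcases hperm with rfl | rfl | rfl | rfl | rfl | rfl <;>
      simp only [pvCombos2, List.map, List.map_cons, List.nil_append,
        List.cons_append, List.contains_cons, List.contains_nil,
        Bool.or_false, Bool.and_eq_true, Bool.or_eq_true, beq_iff_eq, Prod.mk.injEq] <;>
      omega

-- B's Case-2 scan decides pvCorner
theorem pvCase2B_iff (l : List (Int × Int)) :
    ((PySem.Set.ofList l).any (fun t =>
      (PySem.Set.contains (PySem.Set.ofList l) (t.1, t.2 - 1) || PySem.Set.contains (PySem.Set.ofList l) (t.1, t.2 + 1)) &&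
      (PySem.Set.contains (PySem.Set.ofList l) (t.1 - 1, t.2) || PySem.Set.contains (PySem.Set.ofList l) (t.1 + 1, t.2))) = true)
    ↔ pvCorner l := by
  rw [List.any_eq_true]
  constructor
  · rintro ⟨p, hp, hcond⟩
    have hp' : p ∈ l := (PySem.Set.mem_ofList l p).mp hp
    simp only [Bool.and_eq_true, Bool.or_eq_true, PySem.Set.contains_iff,
      PySem.Set.mem_ofList] at hcond
    obtain ⟨hH, hV⟩ := hcond
    rcases hH with hH | hH <;> rcases hV with hV | hV <;>
      exact ⟨p, hp', _, hH, _, hV, by simp, by simp, by simp, by simp⟩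
  · rintro ⟨p, hp, h, hh, v, hv, h1, h2, v1, v2⟩
    refine ⟨p, (PySem.Set.mem_ofList l p).mpr hp, ?_⟩
    simp only [Bool.and_eq_true, Bool.or_eq_true, PySem.Set.contains_iff,
      PySem.Set.mem_ofList]
    constructor
    · rcases h2 with h2 | h2
      · exact Or.inl (by rw [← h1, ← h2]; simpa using hh)
      · exact Or.inr (by rw [← h1, ← h2]; simpa using hh)
    · rcases v1 with v1 | v1
      · exact Or.inl (by rw [← v1, ← v2]; simpa using hv)
      · exact Or.inr (by rw [← v1, ← v2]; simpa using hv)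

-- quadrant label of a tile
def pvQuad (h : Int) (t : Int × Int) : Bool × Bool := (decide (t.1 < h), decide (t.2 < h))

-- A's fold computes the per-quadrant counts
theorem pvFoldA_counts (h : Int) (l : List (Int × Int)) :
    ∀ a b c d : Int,
      l.foldl (fun q t =>
        if t.1 < h then
          if t.2 < h then (q.1 + 1, q.2.1, q.2.2.1, q.2.2.2)
          else (q.1, q.2.1 + 1, q.2.2.1, q.2.2.2)
        else
          if t.2 < h then (q.1, q.2.1, q.2.2.1 + 1, q.2.2.2)
          else (q.1, q.2.1, q.2.2.1, q.2.2.2 + 1)) (a, b, c, d)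
      = (a + ((l.map (pvQuad h)).count (true, true) : Int),
         b + ((l.map (pvQuad h)).count (true, false) : Int),
         c + ((l.map (pvQuad h)).count (false, true) : Int),
         d + ((l.map (pvQuad h)).count (false, false) : Int)) := by
  induction l with
  | nil => intro a b c d; simp
  | cons t ts ih =>
    intro a b c d
    simp only [List.foldl_cons, List.map_cons, List.count_cons]
    by_cases h1 : t.1 < h <;> by_cases h2 : t.2 < h <;>
      simp [pvQuad, h1, h2, ih] <;> omega

-- a list of quadrant labels has length = the sum of the four counts
theorem pvLen_eq_sum_counts (q : List (Bool × Bool)) :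
    q.length = q.count (true, true) + q.count (true, false) +
      q.count (false, true) + q.count (false, false) := by
  induction q with
  | nil => simp
  | cons x xs ih =>
    rcases x with ⟨b1, b2⟩
    rcases b1 <;> rcases b2 <;> simp [ih] <;> omega

-- the dedup of a list over a 4-element type has length 4 iff every value occurs
theorem pvOfList_len4_iff (q : List (Bool × Bool)) :
    (PySem.Set.ofList q).length = 4 ↔ ∀ v : Bool × Bool, v ∈ q := by
  have hnd : (PySem.Set.ofList q).Nodup := PySem.Set.nodup_ofList q
  have hmem : ∀ v : Bool × Bool, v ∈ PySem.Set.ofList q ↔ v ∈ q :=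
    fun v => PySem.Set.mem_ofList q v
  constructor
  · intro hlen v
    have hcard : (PySem.Set.ofList q).toFinset.card = 4 := by
      rw [List.toFinset_card_of_nodup hnd, hlen]
    have huniv : (PySem.Set.ofList q).toFinset = Finset.univ := by
      apply Finset.eq_univ_of_card
      rw [hcard]; rfl
    have : v ∈ (PySem.Set.ofList q).toFinset := by rw [huniv]; exact Finset.mem_univ v
    exact (hmem v).mp (List.mem_toFinset.mp this)
  · intro hall
    have hsub : (Finset.univ : Finset (Bool × Bool)) ⊆ (PySem.Set.ofList q).toFinset := by
      intro v _; exact List.mem_toFinset.mpr ((hmem v).mpr (hall v))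
    have h1 : 4 ≤ (PySem.Set.ofList q).toFinset.card := Finset.card_le_card hsub
    have h2 : (PySem.Set.ofList q).toFinset.card ≤ 4 := by
      have := Finset.card_le_univ (PySem.Set.ofList q).toFinset
      simpa using this
    rw [List.toFinset_card_of_nodup hnd] at h1 h2
    omega

-- Case-1 equivalence: counts all 1 iff length 4 and all four quadrants occupied
theorem pvCase1_iff (h : Int) (l : List (Int × Int)) :
    (((l.map (pvQuad h)).count (true, true) : Int) = 1 ∧
     ((l.map (pvQuad h)).count (true, false) : Int) = 1 ∧
     ((l.map (pvQuad h)).count (false, true) : Int) = 1 ∧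
     ((l.map (pvQuad h)).count (false, false) : Int) = 1)
    ↔ (l.length = 4 ∧ (PySem.Set.ofList (l.map (pvQuad h))).length = 4) := by
  set q := l.map (pvQuad h) with hq
  have hlen : l.length = q.length := by rw [hq, List.length_map]
  rw [hlen, pvOfList_len4_iff, pvLen_eq_sum_counts q]
  constructor
  · intro ⟨h1, h2, h3, h4⟩
    refine ⟨by omega, fun v => ?_⟩
    rcases v with ⟨b1, b2⟩
    rcases b1 <;> rcases b2 <;>
      · rw [← List.count_pos_iff]; omega
  · intro ⟨hsum, hall⟩
    have c1 := List.count_pos_iff.mpr (hall (true, true))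
    have c2 := List.count_pos_iff.mpr (hall (true, false))
    have c3 := List.count_pos_iff.mpr (hall (false, true))
    have c4 := List.count_pos_iff.mpr (hall (false, false))
    omega

-- ===== VERDICT (by name: the statement is the Claim_ definition above) =====
theorem tileYardWith4MissingTiles_spec : Claim_equal_tileYardWith4MissingTiles := by
  intro n l _
  unfold Spec_tileYardWith4MissingTiles tileYardWith4MissingTiles tileYardWith4MissingTiles_alt
  have hhalf : (if n < 0 then (0 : Int) else 2 ^ n.toNat / 2)
      = (if n > 0 then 2 ^ n.toNat / 2 else 0) := by
    rcases lt_trichotomy n 0 with h | h | h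
    · simp [h, not_lt.mpr (le_of_lt h)]
    · subst h; norm_num
    · simp [not_lt.mpr (le_of_lt h), h]
  rw [hhalf]
  set h : Int := if n > 0 then 2 ^ n.toNat / 2 else 0 with hdef
  simp only []
  rw [pvFoldA_counts h l 0 0 0 0]
  have hcase1 := pvCase1_iff h l
  have hcase2 := (pvCase2A_iff l).trans (pvCase2B_iff l).symm
  simp only [zero_add] at *
  have hfun : (fun t : Int × Int => (decide (t.1 < h), decide (t.2 < h))) = pvQuad h := rfl
  rw [hfun]
  by_cases hc : l.length = 4 ∧ (PySem.Set.ofList (l.map (pvQuad h))).length = 4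
  · have ⟨h1, h2, h3, h4⟩ := hcase1.mpr hc
    rw [if_pos (by exact Prod.ext h1 (Prod.ext h2 (Prod.ext h3 h4))), if_pos hc]
  · have hne : ¬ (((l.map (pvQuad h)).count (true, true) : Int) = 1 ∧
        ((l.map (pvQuad h)).count (true, false) : Int) = 1 ∧
        ((l.map (pvQuad h)).count (false, true) : Int) = 1 ∧
        ((l.map (pvQuad h)).count (false, false) : Int) = 1) := fun hx => hc (hcase1.mp hx)
    rw [if_neg (by intro he; exact hne ⟨congrArg Prod.fst he,
          congrArg (Prod.fst ∘ Prod.snd) he,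
          congrArg (Prod.fst ∘ Prod.snd ∘ Prod.snd) he,
          congrArg (Prod.snd ∘ Prod.snd ∘ Prod.snd) he⟩),
        if_neg hc]
    exact Bool.eq_iff_iff.mpr hcase2
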